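-- pv_equiv track=rewrite | github.com/oess/openmm_orion | MDOrion/TrjAnalysis/utils.py | ColorblindRGBMarkerColors
-- ===== SOURCE A (Python) =====
-- def ColorblindRGBMarkerColors(nColors=0):
--     palette = [(0, 114, 178), (0, 158, 115), (213, 94, 0), (204, 121, 167),
--                (240, 228, 66), (230, 159, 0), (86, 180, 233), (150, 150, 150)]
--     if nColors < 1:
--         return palette
--     elif nColors < 9:
--         return palette[:nColors]
--     else:
--         n = int(nColors/8)
--         moreRGB = palette
--         for i in range(n):
--             moreRGB = moreRGB+palette
--         return(moreRGB[:nColors])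
-- ===== SOURCE B (Python) =====
-- def ColorblindRGBMarkerColors(nColors=0):
--     palette = [(0, 114, 178), (0, 158, 115), (213, 94, 0), (204, 121, 167),
--                (240, 228, 66), (230, 159, 0), (86, 180, 233), (150, 150, 150)]
--     if nColors < 1:
--         return palette
--     return [palette[i % 8] for i in range(nColors)]
-- ===== Notes on version B (the rewrite author's own statement) =====
-- stated objective: faster
-- what changed: Replaces the repeated whole-palette concatenation loop (n list copies of growing length) plus final slice by a single pass over the output length with modular indexing.
import Mathlib
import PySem

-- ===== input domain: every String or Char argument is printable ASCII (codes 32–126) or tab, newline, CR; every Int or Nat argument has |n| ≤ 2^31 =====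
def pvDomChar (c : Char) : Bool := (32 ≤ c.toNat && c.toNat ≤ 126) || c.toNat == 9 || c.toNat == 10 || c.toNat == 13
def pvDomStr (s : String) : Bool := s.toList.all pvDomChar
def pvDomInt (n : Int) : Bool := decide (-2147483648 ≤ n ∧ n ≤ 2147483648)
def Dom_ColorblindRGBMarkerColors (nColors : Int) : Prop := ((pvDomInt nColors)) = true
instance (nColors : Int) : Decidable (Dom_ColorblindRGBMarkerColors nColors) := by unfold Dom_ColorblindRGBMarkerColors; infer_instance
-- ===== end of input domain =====

-- B replaces A's repeated whole-palette concatenation + final slice by one pass with modular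
-- indexing over the output length (objective: faster).

-- the 8-colour colorblind palette, shared literal of both ports
def pvPalette : List (Int × Int × Int) :=
  [(0, 114, 178), (0, 158, 115), (213, 94, 0), (204, 121, 167),
   (240, 228, 66), (230, 159, 0), (86, 180, 233), (150, 150, 150)]

-- ===== PORT A =====
-- int(nColors/8): for |nColors| ≤ 2^31 the float division by 8 is exact and nColors is
-- positive on this branch, so int() truncation equals floor division (exact on Dom).
def ColorblindRGBMarkerColors (nColors : Int) : List (Int × Int × Int) :=
  let palette := pvPalette
  if nColors < 1 then palette
  else if nColors < 9 then PySem.List.slice palette none (some nColors)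
  else
    let n := PySem.Int.floordiv nColors 8
    let moreRGB := (PySem.List.pyRange 0 n 1).foldl (fun acc _ => acc ++ palette) palette
    PySem.List.slice moreRGB none (some nColors)

-- ===== PORT B =====
def ColorblindRGBMarkerColors_alt (nColors : Int) : List (Int × Int × Int) :=
  let palette := pvPalette
  if nColors < 1 then palette
  else (PySem.List.pyRange 0 nColors 1).map
    (fun i => PySem.List.pyGetD palette (PySem.Int.mod i 8) (0, 0, 0))

-- ===== PRECONDITION & SPEC =====
def Spec_ColorblindRGBMarkerColors (nColors : Int) (out : List (Int × Int × Int)) : Prop := out = ColorblindRGBMarkerColors_alt nColors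
instance (nColors : Int) (out : List (Int × Int × Int)) : Decidable (Spec_ColorblindRGBMarkerColors nColors out) := by unfold Spec_ColorblindRGBMarkerColors; infer_instance

-- ===== CLAIM (what is proved, stated in full; the proofs are below) =====
def Claim_equal_ColorblindRGBMarkerColors : Prop := ∀ (nColors : Int), Dom_ColorblindRGBMarkerColors nColors → Spec_ColorblindRGBMarkerColors nColors (ColorblindRGBMarkerColors nColors)

-- ===== LEMMAS AND PROOFS =====

-- A's loop: folding `acc ++ palette` over any list appends length-many palette copies.
theorem pvFoldlAppendConst (l : List Int) (init : List (Int × Int × Int)) :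
    l.foldl (fun acc _ => acc ++ pvPalette) init
      = init ++ (List.replicate l.length pvPalette).flatten := by
  induction l generalizing init with
  | nil => simp
  | cons x xs ih =>
    simp [List.foldl_cons, ih, List.replicate_succ, List.append_assoc]

theorem pvFlatLen (m : Nat) : ((List.replicate m pvPalette).flatten).length = m * 8 := by
  simp [List.length_flatten, pvPalette]

theorem pvFlatGetD (m i : Nat) (h : i < m * 8) :
    ((List.replicate m pvPalette).flatten).getD i (0, 0, 0)
      = pvPalette.getD (i % 8) (0, 0, 0) := by
  induction m generalizing i with
  | zero => omega
  | succ n ih =>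
    rw [List.replicate_succ, List.flatten_cons]
    by_cases h8 : i < pvPalette.length
    · rw [List.getD_append _ _ _ _ h8]
      congr 1
      have : i < 8 := by simpa [pvPalette] using h8
      omega
    · have hlen : pvPalette.length = 8 := by simp [pvPalette]
      rw [List.getD_append_right _ _ _ _ (by omega), hlen]
      rw [ih (i - 8) (by rw [hlen] at h8; omega)]
      congr 1
      rw [hlen] at h8
      omega

-- core: truncating m stacked palettes at k ≤ m*8 is cyclic indexing over range k
theorem pvTakeFlat (m k : Nat) (h : k ≤ m * 8) :
    ((List.replicate m pvPalette).flatten).take k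
      = (List.range k).map (fun j => pvPalette.getD (j % 8) (0, 0, 0)) := by
  apply List.ext_getElem
  · rw [List.length_take, pvFlatLen, List.length_map, List.length_range]; omega
  · intro i h1 h2
    have hi : i < k := by simpa using h2
    rw [List.getElem_take, List.getElem_map, List.getElem_range,
      ← List.getD_eq_getElem _ (0, 0, 0)]
    exact pvFlatGetD m i (by omega)

-- ===== VERDICT is the last theorem below =====
-- B unfolded, for nColors = (k : Int), k ≥ 1
theorem pvAltNat (k : Nat) (hk : ¬ ((k : Int) < 1)) :
    ColorblindRGBMarkerColors_alt (k : Int)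
      = (List.range k).map (fun j => pvPalette.getD (j % 8) (0, 0, 0)) := by
  unfold ColorblindRGBMarkerColors_alt
  rw [if_neg hk, PySem.List.pyRange_zero_natCast, List.map_map]
  apply List.map_congr_left
  intro j _
  have h8 : PySem.Int.mod ((j : Nat) : Int) 8 = ((j % 8 : Nat) : Int) := by
    rw [PySem.Int.mod_eq_emod_of_pos (by norm_num)]
    omega
  show PySem.List.pyGetD pvPalette (PySem.Int.mod ((j : Nat) : Int) 8) (0, 0, 0)
      = pvPalette.getD (j % 8) (0, 0, 0)
  rw [h8, PySem.List.pyGetD_natCast]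

theorem ColorblindRGBMarkerColors_spec : Claim_equal_ColorblindRGBMarkerColors := by
  intro nColors _
  unfold Spec_ColorblindRGBMarkerColors
  by_cases h1 : nColors < 1
  · simp [ColorblindRGBMarkerColors, ColorblindRGBMarkerColors_alt, h1]
  · obtain ⟨k, rfl⟩ : ∃ k : Nat, nColors = (k : Int) :=
      ⟨nColors.toNat, (Int.toNat_of_nonneg (by omega)).symm⟩
    rw [pvAltNat k h1]
    simp only [ColorblindRGBMarkerColors, if_neg h1]
    by_cases h9 : (k : Int) < 9
    · rw [if_pos h9, PySem.List.slice_to_natCast]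
      have : pvPalette.take k = ((List.replicate 1 pvPalette).flatten).take k := by simp
      rw [this, pvTakeFlat 1 k (by omega)]
    · rw [if_neg h9]
      have hfd : PySem.Int.floordiv (k : Int) 8 = ((k / 8 : Nat) : Int) := by
        rw [PySem.Int.floordiv_eq_ediv_of_pos (by norm_num)]
        omega
      rw [hfd, PySem.List.pyRange_zero_natCast, pvFoldlAppendConst]
      simp only [List.length_map, List.length_range]
      rw [PySem.List.slice_to_natCast]
      have : pvPalette ++ (List.replicate (k / 8) pvPalette).flatten
          = (List.replicate (k / 8 + 1) pvPalette).flatten := by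
        rw [List.replicate_succ, List.flatten_cons]
      rw [this, pvTakeFlat (k / 8 + 1) k (by omega)]
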